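/-
  THE LANGUAGE jsmn ACCEPTS, PART 2: THE COUNTING MODE (tokens == NULL), EXACTLY, BOTH CONFIGURATIONS

  `count_mode`: on every text shorter than 2^31 bytes, `jsmn_init; jsmn_parse(&p, js, len, NULL, n)` returns `countResult (lex strict .top js)`:
  the number of `{` `[` strings and primitives the lexer of Json/Jsmn/AcceptLang.lean finds if it reaches the end of the text, -2 if it
  ends with `inval`, -3 if it ends with `part`. Brackets, colons and commas are not looked at: `]`, `[}`, `{"a":1]`, `:,:` are accepted.
-/
import Json.Jsmn.AcceptLang
set_option linter.unusedSimpArgs false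

namespace Jsmn.AcceptLang
open Jsmn

/-- The result of the counting mode when `cnt` tokens have been counted and the rest of the text lexes to `r`. -/
def combine (cnt : Int) (r : List Item × Ending) : Int :=
  match r.2 with
  | .eof => cnt + tokCount r.1
  | .inval => JSMN_ERROR_INVAL
  | .part => JSMN_ERROR_PART

theorem combine_push (cnt : Int) (i : Item) (r : List Item × Ending) :
    combine cnt (push i r) = combine (cnt + if i.isToken then 1 else 0) r := by
  obtain ⟨items, e⟩ := r
  cases e <;> cases h : i.isToken <;> simp [combine, push, tokCount, List.filter, h] <;> omega

/-- A byte that jsmn_parse's `switch` sends to jsmn_parse_primitive: the lexer reports a primitive and goes on in `prim` mode (a byte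
that is not printable ends the text with `inval` either way). -/
theorem combine_lex_prim (cfg : Config) (cnt : Int) (c : UInt8) (t : List UInt8) (h0 : c ≠ 0)
    (h1 : c ≠ 0x7b) (h2 : c ≠ 0x5b) (h3 : c ≠ 0x7d) (h4 : c ≠ 0x5d) (h5 : c ≠ 0x22) (h6 : isWs c = false) (h7 : c ≠ 0x3a) (h8 : c ≠ 0x2c)
    (hs : cfg.strict = true → primStart c = true) :
    combine cnt (lex cfg.strict .top (c :: t)) = combine (cnt + 1) (lex cfg.strict .prim (c :: t)) := by
  by_cases hp : notPrintable c = true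
  · cases hst : cfg.strict with
    | false => simp [lex, *, combine]
    | true =>
      have := hs hst
      simp only [primStart, notPrintable] at this hp
      simp at this hp
      rcases this with (((h | h) | h) | h) | h
      · subst h; simp at hp
      · omega
      · subst h; simp at hp
      · subst h; simp at hp
      · subst h; simp at hp
  · have hp' : notPrintable c = false := by simpa using hp
    have : lex cfg.strict .top (c :: t) = push .prim (lex cfg.strict .prim (c :: t)) := by
      cases hst : cfg.strict with
      | false => simp [lex, *]
      | true => simp [lex, *, hs hst]
    rw [this, combine_push]; simp [Item.isToken]

/-- The main loop in counting mode, from any position: the count so far plus what the lexer finds in the rest of the text. -/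
theorem loop_count (cfg : Config) (js : List UInt8) (n : Nat) (hL : js.length < 2147483648) : ∀ fuel pos tn sup (cnt : Int),
    pos ≤ js.length → js.length - pos < fuel → 0 ≤ cnt → cnt + ((js.length - pos : Nat) : Int) < 2147483648 →
    (loop cfg js n fuel ⟨⟨pos, tn, sup⟩, none, cnt⟩).map (fun x => (x.1, x.2.toks)) =
      some (combine cnt (lex cfg.strict .top (js.drop pos)), none) := by
  intro fuel
  induction fuel with
  | zero => intro pos _ _ _ _ h; omega
  | succ fuel ih =>
    intro pos tn sup cnt hp hf hc0 hcb
    rw [loop]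
    cases hd : js.drop pos with
    | nil => exact by simp [more_of_drop_nil hd, finish, combine, lex, tokCount]
    | cons c t =>
      obtain ⟨hlt, hc, ht, hm⟩ := of_drop_cons hd
      have hu : u32 ((pos : Int) + 1) = pos + 1 := u32_succ (by omega)
      have hi : i32 (cnt + 1) = cnt + 1 := by unfold i32; omega
      by_cases h0 : c = 0
      · exact by simp [hm, h0, finish, combine, lex, tokCount]
      have hm' : more js pos = true := by simp [hm, h0]
      simp only [hm', hc, if_true]
      -- the step to the next byte, for the cases that consume one byte
      have next1 : ∀ sup' cnt', 0 ≤ cnt' → cnt' ≤ cnt + 1 →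
          (loop cfg js n fuel ⟨⟨pos + 1, tn, sup'⟩, none, cnt'⟩).map (fun x => (x.1, x.2.toks)) = some (combine cnt' (lex cfg.strict .top t), none) := by
        intro sup' cnt' h1 h2
        have := ih (pos + 1) tn sup' cnt' (by omega) (by omega) h1 (by omega)
        rwa [ht] at this
      by_cases h1 : c = 0x7b
      · subst h1
        have hs' := next1 sup (cnt + 1) (by omega) (by omega)
        exact by simp [body, openBracket, hi, hu, hs', lex, combine_push, Item.isToken]
      by_cases h2 : c = 0x5b
      · subst h2
        have hs' := next1 sup (cnt + 1) (by omega) (by omega)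
        exact by simp [body, openBracket, hi, hu, hs', lex, combine_push, Item.isToken]
      by_cases h3 : c = 0x7d
      · subst h3
        have hs' := next1 sup cnt (by omega) (by omega)
        exact by simp [body, closeBracket, hu, hs', lex, combine_push, Item.isToken]
      by_cases h4 : c = 0x5d
      · subst h4
        have hs' := next1 sup cnt (by omega) (by omega)
        exact by simp [body, closeBracket, hu, hs', lex, combine_push, Item.isToken]
      by_cases h5 : c = 0x22
      · -- a string
        subst h5
        obtain ⟨r, hr, hrel⟩ := strScan_sim cfg.strict js hL (fuel + 1) (pos + 1) (by omega) (by omega)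
        have hlex : lex cfg.strict .top (0x22 :: t) = push .str (lex cfg.strict (.str 0) (js.drop (pos + 1))) := by simp [lex, ht]
        cases r with
        | bad =>
          simp only [StrRel] at hrel
          exact by simp [body, parseString, hu, hr, hlex, hrel, combine, push, JSMN_ERROR_INVAL]
        | eoi =>
          simp only [StrRel] at hrel
          exact by simp [body, parseString, hu, hr, hlex, hrel, combine, push, JSMN_ERROR_PART]
        | quote q =>
          simp only [StrRel] at hrel
          obtain ⟨hq1, hq2, hq3⟩ := hrel
          have hs' := ih (q + 1) tn sup (cnt + 1) (by omega) (by omega) (by omega) (by omega)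
          have hu' : u32 ((q : Int) + 1) = q + 1 := u32_succ (by omega)
          exact by simp [body, parseString, hu, hr, hlex, hq3, bumpSuper, hi, hu', hs', combine_push, Item.isToken]
      by_cases h6 : isWs c = true
      · have hs' := next1 sup cnt (by omega) (by omega)
        have h6' := h6
        simp only [isWs, Bool.or_eq_true, beq_iff_eq] at h6'
        rcases h6' with ((h | h) | h) | h <;> subst h <;> simpa [body, hu, lex, isWs] using hs'
      have h6' : ¬(((c = 0x09 ∨ c = 0x0d) ∨ c = 0x0a) ∨ c = 0x20) := by
        simpa [isWs] using h6
      by_cases h7 : c = 0x3a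
      · subst h7
        have hs' := next1 (i32 ((tn : Int) - 1)) cnt (by omega) (by omega)
        exact by simp [body, hu, hs', lex, combine_push, Item.isToken, isWs]
      by_cases h8 : c = 0x2c
      · subst h8
        have hs' := next1 sup cnt (by omega) (by omega)
        exact by simp [body, comma, hu, hs', lex, combine_push, Item.isToken, isWs]
      -- a primitive (or, in strict mode, a byte that cannot start one)
      have hws : isWs c = false := by simpa using h6
      have hbody : body cfg js (fuel + 1) n ⟨⟨pos, tn, sup⟩, none, cnt⟩ c =
          if cfg.strict && !primStart c then some (.ret JSMN_ERROR_INVAL ⟨⟨pos, tn, sup⟩, none, cnt⟩)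
          else primitiveCase cfg js (fuel + 1) n ⟨⟨pos, tn, sup⟩, none, cnt⟩ := by
        simp only [body]
        simp [h1, h2, h3, h4, h5, h6', h7, h8]
        cases cfg.strict <;> cases primStart c <;> simp
      rw [hbody]
      by_cases hst : (cfg.strict && !primStart c) = true
      · simp only [Bool.and_eq_true, Bool.not_eq_true'] at hst
        simp [hst, lex, h0, h1, h2, h3, h4, h5, hws, h7, h8, combine, JSMN_ERROR_INVAL]
      have hst' : cfg.strict = true → primStart c = true := by
        intro h; simpa [h] using hst
      simp only [hst, Bool.false_eq_true, if_false]
      rw [combine_lex_prim cfg cnt c t h0 h1 h2 h3 h4 h5 hws h7 h8 hst', ← hd]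
      obtain ⟨r, hr, hrel⟩ := primScan_sim cfg js hL (fuel + 1) pos hp hf
      have hns : primStop cfg c = false := by
        simp [primStop, h7, h8, h3, h4]
        simpa [not_or] using h6'
      -- after the primitive the loop goes on at `q` (a stop character, or the end)
      have goOn : ∀ q, pos ≤ q → q ≤ js.length → q ≠ pos → lex cfg.strict .prim (js.drop pos) = lex cfg.strict .top (js.drop q) →
          (loop cfg js n fuel ⟨⟨u32 ((u32 ((q : Int) - 1) : Nat) + 1), tn, sup⟩, none, cnt + 1⟩).map (fun x => (x.1, x.2.toks)) =
            some (combine (cnt + 1) (lex cfg.strict .prim (js.drop pos)), none) := by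
        intro q hq1 hq2 hq3 hq4
        have hu3 : u32 ((u32 ((q : Int) - 1) : Nat) + 1) = q := by unfold u32; omega
        rw [hu3, hq4]
        exact ih q tn sup (cnt + 1) hq2 (by omega) (by omega) (by omega)
      cases r with
      | bad =>
        simp only [PrimRel] at hrel
        exact by simp [primitiveCase, parsePrimitive, hr, hrel, combine, JSMN_ERROR_INVAL]
      | found q =>
        simp only [PrimRel] at hrel
        obtain ⟨hq1, hq2, hq3, hq4, _⟩ := hrel
        have hne : q ≠ pos := by intro h; rw [h, hc, hns] at hq3; cases hq3
        have hs' := goOn q hq1 (by omega) hne hq4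
        exact by simp [primitiveCase, parsePrimitive, hr, bumpSuper, hi, hs']
      | eoi q =>
        simp only [PrimRel] at hrel
        obtain ⟨hq1, hq2, hq3, hq4, _⟩ := hrel
        cases hstr : cfg.strict with
        | true =>
          rw [hstr] at hq4
          exact by simp [primitiveCase, parsePrimitive, hr, hstr, hq4, combine, JSMN_ERROR_PART]
        | false =>
          have hne : q ≠ pos := by intro h; rw [h, hm'] at hq3; cases hq3
          have hq5 : lex cfg.strict .prim (js.drop pos) = lex cfg.strict .top (js.drop q) := by
            rw [hq4, lex_top_of_not_more _ hq3]; simp [hstr]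
          have hs' := goOn q hq1 hq2 hne hq5
          rw [hstr] at hs'
          exact by simp [primitiveCase, parsePrimitive, hr, hstr, bumpSuper, hi, hs']

/-- **COUNTING MODE, EXACTLY** (both configurations, any `num_tokens`): on a text shorter than 2^31 bytes `jsmn_init; jsmn_parse(…, NULL, n)`
answers the number of tokens the lexer finds, or -2 / -3 when the lexer ends with `inval` / `part`. -/
theorem count_mode (cfg : Config) (js : List UInt8) (n : Nat) (hL : js.length < 2147483648) :
    run cfg js none n = some (countResult (lex cfg.strict .top js), none) := by
  have h := loop_count cfg js n hL (js.length + 1) 0 0 (-1) 0 (by omega) (by omega) (by omega) (by omega)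
  have h32 : i32 ((0 : Nat) : Int) = 0 := by decide
  simp only [run, parse, parseFuel, Parser.init, Option.map_map, h32]
  simp only [List.drop_zero] at h
  have hc : combine 0 (lex cfg.strict .top js) = countResult (lex cfg.strict .top js) := by
    simp only [combine, countResult]; split <;> simp_all
  rw [← hc, ← h]
  rfl

/-- The counting mode ACCEPTS a text (answers a count, not an error) exactly when the lexer reaches the end of the text; the count is
then the number of `{` `[` strings and primitives. -/
theorem count_mode_accepts (cfg : Config) (js : List UInt8) (n : Nat) (hL : js.length < 2147483648) :
    (∃ r, 0 ≤ r ∧ run cfg js none n = some (r, none)) ↔ (lex cfg.strict .top js).2 = .eof := by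
  rw [count_mode cfg js n hL]
  constructor
  · rintro ⟨r, hr, h⟩
    simp only [Option.some.injEq, Prod.mk.injEq, and_true] at h
    subst h
    revert hr
    simp only [countResult]
    split <;> simp_all [JSMN_ERROR_INVAL, JSMN_ERROR_PART]
  · intro h
    exact ⟨_, by simp [countResult, h], rfl⟩

/-- … and the count is the number of token items. -/
theorem count_mode_value (cfg : Config) (js : List UInt8) (n : Nat) (hL : js.length < 2147483648)
    (h : (lex cfg.strict .top js).2 = .eof) : run cfg js none n = some ((tokCount (lex cfg.strict .top js).1 : Int), none) := by
  rw [count_mode cfg js n hL]; simp [countResult, h]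
end Jsmn.AcceptLang
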